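-- pv_equiv track=rewrite | github.com/johnssonwong/dg-monitor | dg_predict_final.py | judge_tables
-- ===== SOURCE A (Python) =====
-- def judge_tables(tables):
--     LONG_CHAIN = 4
--     DRAGON = 8
--     SUPER_DRAGON = 10
--     valid = []
--     for t in tables:
--         if t.get("alternating_tail_len",0) >= 4:
--             continue
--         valid.append(t)
--     count_long = sum(1 for t in valid if t.get("max_run",0) >= LONG_CHAIN)
--     count_dragon = sum(1 for t in valid if t.get("max_run",0) >= DRAGON)
--     count_super = sum(1 for t in valid if t.get("max_run",0) >= SUPER_DRAGON)
--     if count_dragon >= 3: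
--         return "strong", {"count_dragon": count_dragon, "count_super": count_super, "count_long": count_long}
--     if count_super >=1 and count_dragon >=2:
--         return "strong", {"count_dragon": count_dragon, "count_super": count_super, "count_long": count_long}
--     if count_long >= 2:
--         return "medium", {"count_dragon": count_dragon, "count_super": count_super, "count_long": count_long}
--     return "none", {"count_dragon": count_dragon, "count_super": count_super, "count_long": count_long}
-- ===== SOURCE B (Python) =====
-- def _lower(runs, x, lo, hi):
--     # first index i in [lo, hi) of ascending-sorted runs with runs[i] >= x (iterative binary search)
--     while lo < hi:
--         mid = (lo + hi) // 2
--         if runs[mid] < x: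
--             lo = mid + 1
--         else:
--             hi = mid
--     return lo
--
--
-- def judge_tables(tables):
--     runs = sorted(t.get("max_run", 0) for t in tables
--                   if t.get("alternating_tail_len", 0) < 4)
--     n = len(runs)
--     count_long = n - _lower(runs, 4, 0, n)
--     count_dragon = n - _lower(runs, 8, 0, n)
--     count_super = n - _lower(runs, 10, 0, n)
--     counts = {"count_dragon": count_dragon, "count_super": count_super,
--               "count_long": count_long}
--     if count_dragon >= 3 or (count_super >= 1 and count_dragon >= 2):
--         return "strong", counts
--     if count_long >= 2:
--         return "medium", counts
--     return "none", counts
-- ===== Notes on version B (the rewrite author's own statement) =====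
-- stated objective: alternative
-- what changed: Instead of three linear counting comprehensions over the filtered tables, B sorts the surviving max_run values once and derives each threshold count as n minus a recursive binary-search lower bound.
import Mathlib
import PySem

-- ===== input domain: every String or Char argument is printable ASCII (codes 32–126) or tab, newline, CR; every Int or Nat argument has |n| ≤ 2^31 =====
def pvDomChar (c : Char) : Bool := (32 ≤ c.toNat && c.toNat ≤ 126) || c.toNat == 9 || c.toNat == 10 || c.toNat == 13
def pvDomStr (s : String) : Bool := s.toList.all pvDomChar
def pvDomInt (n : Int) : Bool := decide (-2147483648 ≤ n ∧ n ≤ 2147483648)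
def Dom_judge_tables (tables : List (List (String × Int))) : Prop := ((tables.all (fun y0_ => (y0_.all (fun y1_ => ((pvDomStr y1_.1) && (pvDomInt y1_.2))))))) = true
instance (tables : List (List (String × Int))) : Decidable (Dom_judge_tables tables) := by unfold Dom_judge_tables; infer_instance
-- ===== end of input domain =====

-- B derives the three threshold counts by sorting the surviving max_run values and binary-searching each threshold, instead of A's filter-then-three-counting-scans (alternative algorithm, same result).


-- ===== PORT A =====
-- t.get(key, 0) on a Python dict (assoc list, first match)
def tget (t : List (String × Int)) (k : String) : Int :=
  (PySem.Dict.mk t).getD k 0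

def judge_tables (tables : List (List (String × Int))) : String × (List (String × Int)) :=
  let valid := tables.foldl (fun acc t =>
    if tget t "alternating_tail_len" ≥ 4 then acc else acc ++ [t]) []
  let count_long : Int := valid.foldl (fun n t => if tget t "max_run" ≥ 4 then n + 1 else n) 0
  let count_dragon : Int := valid.foldl (fun n t => if tget t "max_run" ≥ 8 then n + 1 else n) 0
  let count_super : Int := valid.foldl (fun n t => if tget t "max_run" ≥ 10 then n + 1 else n) 0
  if count_dragon ≥ 3 then
    ("strong", [("count_dragon", count_dragon), ("count_super", count_super), ("count_long", count_long)])
  else if count_super ≥ 1 ∧ count_dragon ≥ 2 then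
    ("strong", [("count_dragon", count_dragon), ("count_super", count_super), ("count_long", count_long)])
  else if count_long ≥ 2 then
    ("medium", [("count_dragon", count_dragon), ("count_super", count_super), ("count_long", count_long)])
  else
    ("none", [("count_dragon", count_dragon), ("count_super", count_super), ("count_long", count_long)])

-- ===== PORT B =====
-- _lower: first index i in [lo, hi) of the ascending list with runs[i] >= x (iterative binary search).
-- The while loop is ported with a fuel counter hi - lo (a pure totality guard: the gap shrinks every
-- iteration, so hi - lo iterations always suffice); runs[mid] is ported as getD mid 0: every reachable
-- probe has lo ≤ mid < hi ≤ len, so the index is in range (exact there).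
def lowerBgo (runs : List Int) (x : Int) : Nat → Nat → Nat → Nat
  | 0, lo, _ => lo
  | fuel + 1, lo, hi =>
    if lo ≥ hi then lo
    else
      let mid := (lo + hi) / 2
      if runs.getD mid 0 < x then lowerBgo runs x fuel (mid + 1) hi
      else lowerBgo runs x fuel lo mid

def lowerB (runs : List Int) (x : Int) (lo hi : Nat) : Nat :=
  lowerBgo runs x (hi - lo) lo hi

def judge_tables_alt (tables : List (List (String × Int))) : String × (List (String × Int)) :=
  let runs := PySem.List.sorted
    ((tables.filter (fun t => tget t "alternating_tail_len" < 4)).map (fun t => tget t "max_run"))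
    (fun v => v) false
  let n := runs.length
  let count_long : Int := (n : Int) - (lowerB runs 4 0 n : Int)
  let count_dragon : Int := (n : Int) - (lowerB runs 8 0 n : Int)
  let count_super : Int := (n : Int) - (lowerB runs 10 0 n : Int)
  let counts := [("count_dragon", count_dragon), ("count_super", count_super), ("count_long", count_long)]
  if count_dragon ≥ 3 ∨ (count_super ≥ 1 ∧ count_dragon ≥ 2) then ("strong", counts)
  else if count_long ≥ 2 then ("medium", counts)
  else ("none", counts)

-- ===== PRECONDITION & SPEC =====
def Spec_judge_tables (tables : List (List (String × Int))) (out : String × (List (String × Int))) : Prop := out = judge_tables_alt tables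
instance (tables : List (List (String × Int))) (out : String × (List (String × Int))) : Decidable (Spec_judge_tables tables out) := by unfold Spec_judge_tables; infer_instance

-- ===== CLAIM =====
def Claim_equal_judge_tables : Prop := ∀ (tables : List (List (String × Int))), Dom_judge_tables tables → Spec_judge_tables tables (judge_tables tables)

-- ===== LEMMAS AND PROOFS =====
theorem valid_foldl (tables : List (List (String × Int))) (acc : List (List (String × Int))) :
    tables.foldl (fun acc t => if tget t "alternating_tail_len" ≥ 4 then acc else acc ++ [t]) acc =
      acc ++ tables.filter (fun t => tget t "alternating_tail_len" < 4) := by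
  induction tables generalizing acc with
  | nil => simp
  | cons t ts ih =>
    by_cases h : tget t "alternating_tail_len" ≥ 4
    · have h' : ¬ tget t "alternating_tail_len" < 4 := by omega
      simp [h, h', ih]
    · have h' : tget t "alternating_tail_len" < 4 := by omega
      simp [h, h', ih]

-- unfolding equations for the fuelled loop body (the let needs a definitional step)
theorem lowerBgo_stop (runs : List Int) (x : Int) (fuel lo hi : Nat) (h : lo ≥ hi) :
    lowerBgo runs x (fuel + 1) lo hi = lo := by
  show (if lo ≥ hi then lo
        else if runs.getD ((lo + hi) / 2) 0 < x then lowerBgo runs x fuel ((lo + hi) / 2 + 1) hi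
        else lowerBgo runs x fuel lo ((lo + hi) / 2)) = _
  rw [if_pos h]

theorem lowerBgo_lt (runs : List Int) (x : Int) (fuel lo hi : Nat) (h : ¬ lo ≥ hi)
    (hm : runs.getD ((lo + hi) / 2) 0 < x) :
    lowerBgo runs x (fuel + 1) lo hi = lowerBgo runs x fuel ((lo + hi) / 2 + 1) hi := by
  show (if lo ≥ hi then lo
        else if runs.getD ((lo + hi) / 2) 0 < x then lowerBgo runs x fuel ((lo + hi) / 2 + 1) hi
        else lowerBgo runs x fuel lo ((lo + hi) / 2)) = _
  rw [if_neg h, if_pos hm]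

theorem lowerBgo_ge (runs : List Int) (x : Int) (fuel lo hi : Nat) (h : ¬ lo ≥ hi)
    (hm : ¬ runs.getD ((lo + hi) / 2) 0 < x) :
    lowerBgo runs x (fuel + 1) lo hi = lowerBgo runs x fuel lo ((lo + hi) / 2) := by
  show (if lo ≥ hi then lo
        else if runs.getD ((lo + hi) / 2) 0 < x then lowerBgo runs x fuel ((lo + hi) / 2 + 1) hi
        else lowerBgo runs x fuel lo ((lo + hi) / 2)) = _
  rw [if_neg h, if_neg hm]

-- invariant characterisation of the fuelled binary search on a monotone list
theorem lowerBgo_invariant (runs : List Int) (x : Int)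
    (hmono : ∀ p q : Nat, p ≤ q → q < runs.length → runs.getD p 0 ≤ runs.getD q 0) :
    ∀ fuel lo hi : Nat, hi - lo ≤ fuel → lo ≤ hi → hi ≤ runs.length →
      (∀ j, j < lo → runs.getD j 0 < x) →
      (∀ j, hi ≤ j → j < runs.length → x ≤ runs.getD j 0) →
      lowerBgo runs x fuel lo hi ≤ runs.length ∧
        (∀ j, j < lowerBgo runs x fuel lo hi → runs.getD j 0 < x) ∧
        (∀ j, lowerBgo runs x fuel lo hi ≤ j → j < runs.length → x ≤ runs.getD j 0) := by
  intro fuel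
  induction fuel with
  | zero =>
    intro lo hi hf hlohi hhi hlo hhi'
    have heq : lo = hi := by omega
    simp only [lowerBgo]
    exact ⟨by omega, fun j hj => hlo j hj, fun j hj hj' => hhi' j (by omega) hj'⟩
  | succ fuel ih =>
    intro lo hi hf hlohi hhi hlo hhi'
    by_cases h : lo ≥ hi
    · rw [lowerBgo_stop runs x fuel lo hi h]
      exact ⟨by omega, fun j hj => hlo j hj, fun j hj hj' => hhi' j (by omega) hj'⟩
    · by_cases hm : runs.getD ((lo + hi) / 2) 0 < x
      · rw [lowerBgo_lt runs x fuel lo hi h hm]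
        refine ih ((lo + hi) / 2 + 1) hi (by omega) (by omega) hhi (fun j hj => ?_) hhi'
        have hmid : (lo + hi) / 2 < runs.length := by omega
        exact lt_of_le_of_lt (hmono j ((lo + hi) / 2) (by omega) hmid) hm
      · rw [lowerBgo_ge runs x fuel lo hi h hm]
        refine ih lo ((lo + hi) / 2) (by omega) (by omega) (by omega) hlo (fun j hj hj' => ?_)
        exact le_trans (le_of_not_gt hm) (hmono ((lo + hi) / 2) j hj hj')

theorem lowerB_invariant (runs : List Int) (x : Int)
    (hmono : ∀ p q : Nat, p ≤ q → q < runs.length → runs.getD p 0 ≤ runs.getD q 0) :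
    lowerB runs x 0 runs.length ≤ runs.length ∧
      (∀ j, j < lowerB runs x 0 runs.length → runs.getD j 0 < x) ∧
      (∀ j, lowerB runs x 0 runs.length ≤ j → j < runs.length → x ≤ runs.getD j 0) :=
  lowerBgo_invariant runs x hmono (runs.length - 0) 0 runs.length (by omega) (by omega)
    (by omega) (by omega) (by omega)

-- n - lowerB runs x 0 n counts the elements ≥ x of a monotone list
theorem lowerB_count (runs : List Int) (x : Int)
    (hmono : ∀ p q : Nat, p ≤ q → q < runs.length → runs.getD p 0 ≤ runs.getD q 0) :
    runs.countP (fun v => x ≤ v) = runs.length - lowerB runs x 0 runs.length := by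
  obtain ⟨hr, hbelow, habove⟩ :=
    lowerB_invariant runs x hmono
  set r := lowerB runs x 0 runs.length with hrdef
  have hsplit := List.take_append_drop r runs
  have htake : (runs.take r).countP (fun v => x ≤ v) = 0 := by
    rw [List.countP_eq_zero]
    intro a ha
    obtain ⟨j, hj, hja⟩ := List.mem_take_iff_getElem.mp ha
    have := hbelow j (by omega)
    rw [List.getD_eq_getElem _ _ (by omega), hja] at this
    simpa using this
  have hdrop : (runs.drop r).countP (fun v => x ≤ v) = (runs.drop r).length := by
    rw [List.countP_eq_length]
    intro a ha
    obtain ⟨j, hj, hja⟩ := List.mem_drop_iff_getElem.mp ha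
    have := habove (r + j) (by omega) (by omega)
    rw [List.getD_eq_getElem _ _ (by omega), hja] at this
    simpa using this
  calc runs.countP (fun v => x ≤ v)
      = ((runs.take r) ++ (runs.drop r)).countP (fun v => x ≤ v) := by rw [hsplit]
    _ = (runs.take r).countP (fun v => x ≤ v) + (runs.drop r).countP (fun v => x ≤ v) :=
        List.countP_append
    _ = (runs.drop r).length := by rw [htake, hdrop, Nat.zero_add]
    _ = runs.length - r := by simp

-- the sorted list of surviving max_run values is monotone under getD
theorem runs_mono (tables : List (List (String × Int))) :
    ∀ p q : Nat, p ≤ q →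
      q < (PySem.List.sorted ((tables.filter (fun t => tget t "alternating_tail_len" < 4)).map (fun t => tget t "max_run")) (fun v => v) false).length →
      (PySem.List.sorted ((tables.filter (fun t => tget t "alternating_tail_len" < 4)).map (fun t => tget t "max_run")) (fun v => v) false).getD p 0 ≤
      (PySem.List.sorted ((tables.filter (fun t => tget t "alternating_tail_len" < 4)).map (fun t => tget t "max_run")) (fun v => v) false).getD q 0 := by
  intro p q hpq hq
  set s := PySem.List.sorted ((tables.filter (fun t => tget t "alternating_tail_len" < 4)).map (fun t => tget t "max_run")) (fun v => v) false with hs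
  have hpair : s.Pairwise (fun a b => a ≤ b) := PySem.List.sorted_pairwise _ _
  rw [List.getD_eq_getElem _ _ (by omega), List.getD_eq_getElem _ _ hq]
  rcases Nat.lt_or_ge p q with hlt | hge
  · exact List.pairwise_iff_getElem.mp hpair p q (by omega) hq hlt
  · have : p = q := by omega
    subst this; exact le_refl _

-- A's count over the valid list equals B's n - lowerB count (for each threshold x)
theorem count_eq (tables : List (List (String × Int))) (x : Int) :
    ((tables.filter (fun t => tget t "alternating_tail_len" < 4)).foldl
        (fun n t => if tget t "max_run" ≥ x then n + 1 else n) 0 : Int) =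
      ((PySem.List.sorted ((tables.filter (fun t => tget t "alternating_tail_len" < 4)).map (fun t => tget t "max_run")) (fun v => v) false).length : Int) -
      (lowerB (PySem.List.sorted ((tables.filter (fun t => tget t "alternating_tail_len" < 4)).map (fun t => tget t "max_run")) (fun v => v) false) x 0
        (PySem.List.sorted ((tables.filter (fun t => tget t "alternating_tail_len" < 4)).map (fun t => tget t "max_run")) (fun v => v) false).length : Int) := by
  set vs := tables.filter (fun t => tget t "alternating_tail_len" < 4) with hvs
  set s := PySem.List.sorted (vs.map (fun t => tget t "max_run")) (fun v => v) false with hs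
  have hperm : s.Perm (vs.map (fun t => tget t "max_run")) := PySem.List.sorted_perm _ _ _
  have hcount : s.countP (fun v => x ≤ v) = vs.countP (fun t => x ≤ tget t "max_run") := by
    rw [hperm.countP_eq, List.countP_map]
    rfl
  have hfold : (vs.foldl (fun n t => if tget t "max_run" ≥ x then n + 1 else n) (0 : Int)) =
      (vs.countP (fun t => x ≤ tget t "max_run") : Int) := by
    have := PySem.List.foldl_ite_add_one (fun t => tget t "max_run" ≥ x) vs (0 : Int)
    simpa using this
  have hlen : s.length = (vs.map (fun t => tget t "max_run")).length := hperm.length_eq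
  have hb := lowerB_count s x (runs_mono tables)
  have hle : lowerB s x 0 s.length ≤ s.length :=
    (lowerB_invariant s x (runs_mono tables)).1
  rw [hfold, ← hcount, hb]
  omega

-- A's four-branch decision tree equals B's merged three-branch tree
theorem jt_tree (a b c : Int) (counts : List (String × Int)) :
    (if b ≥ 3 then (("strong" : String), counts)
     else if c ≥ 1 ∧ b ≥ 2 then ("strong", counts)
     else if a ≥ 2 then ("medium", counts)
     else ("none", counts)) =
    (if b ≥ 3 ∨ (c ≥ 1 ∧ b ≥ 2) then (("strong" : String), counts)
     else if a ≥ 2 then ("medium", counts)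
     else ("none", counts)) := by
  split_ifs <;> first | rfl | tauto

-- ===== VERDICT =====
theorem judge_tables_spec : Claim_equal_judge_tables := by
  intro tables _
  show judge_tables tables = judge_tables_alt tables
  unfold judge_tables judge_tables_alt
  rw [valid_foldl]
  simp only [List.nil_append]
  rw [count_eq tables 4, count_eq tables 8, count_eq tables 10]
  exact jt_tree _ _ _ _
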